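-- pv_equiv track=rewrite | github.com/kyahikaru/hinglish-prompt-injection-detector | preprocessing/normalization.py | normalize_leet_speak
-- ===== SOURCE A (Python) =====
-- def normalize_leet_speak(text: str) -> str:
--     """
--     Map common leet speak characters to Latin letters.
--     Example: '1gn0r3' -> 'ignore', 'pr3v10u5' -> 'previous'
--     """
--     leet_map = {
--         '0': 'o',
--         '1': 'i',
--         '3': 'e',
--         '4': 'a',
--         '5': 's',
--         '7': 't',
--         '8': 'b',
--         '@': 'a',
--         '$': 's',
--         '+': 't',
--     }
--     for num, char in leet_map.items():
--         text = text.replace(num, char)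
--     return text
-- ===== SOURCE B (Python) =====
-- def normalize_leet_speak(text: str) -> str:
--     """
--     Map common leet speak characters to Latin letters.
--     Example: '1gn0r3' -> 'ignore', 'pr3v10u5' -> 'previous'
--     """
--     leet_map = {
--         '0': 'o',
--         '1': 'i',
--         '3': 'e',
--         '4': 'a',
--         '5': 's',
--         '7': 't',
--         '8': 'b',
--         '@': 'a',
--         '$': 's',
--         '+': 't',
--     }
--     return ''.join(leet_map.get(c, c) for c in text)
-- ===== Notes on version B (the rewrite author's own statement) =====
-- stated objective: simpler
-- what changed: One pass over the characters with a single dict lookup per character, instead of ten successive full-string .replace passes; safe because no replacement value is itself a key.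
import Mathlib
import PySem

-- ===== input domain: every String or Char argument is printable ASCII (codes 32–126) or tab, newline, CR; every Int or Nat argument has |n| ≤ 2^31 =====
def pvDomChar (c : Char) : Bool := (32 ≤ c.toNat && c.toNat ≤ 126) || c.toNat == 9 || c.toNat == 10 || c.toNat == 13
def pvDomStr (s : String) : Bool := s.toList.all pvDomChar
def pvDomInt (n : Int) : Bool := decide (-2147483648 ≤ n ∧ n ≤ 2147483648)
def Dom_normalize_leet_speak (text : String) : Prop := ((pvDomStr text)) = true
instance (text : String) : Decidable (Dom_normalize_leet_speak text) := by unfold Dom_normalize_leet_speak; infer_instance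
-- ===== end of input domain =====

-- B makes one pass over the characters with a dict lookup per character instead of A's ten successive full-string .replace passes (objective: simpler; no replacement value is itself a key, so the passes never cascade).

-- ===== PORT A =====
-- A's leet_map, a dict iterated with .items()
def leetDictA : PySem.Dict String String :=
  PySem.Dict.ofList [("0","o"),("1","i"),("3","e"),("4","a"),("5","s"),("7","t"),("8","b"),("@","a"),("$","s"),("+","t")]

def normalize_leet_speak (text : String) : String :=
  leetDictA.items.foldl (fun t p => PySem.Str.replace t p.1 p.2) text

-- ===== PORT B =====
-- B's leet_map, looked up per character with .get(c, c), the results joined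
def leetDictB : PySem.Dict Char Char :=
  PySem.Dict.ofList [('0','o'),('1','i'),('3','e'),('4','a'),('5','s'),('7','t'),('8','b'),('@','a'),('$','s'),('+','t')]

def normalize_leet_speak_alt (text : String) : String :=
  String.ofList (text.toList.map (fun c => leetDictB.getD c c))

-- ===== PRECONDITION & SPEC =====
def Spec_normalize_leet_speak (text : String) (out : String) : Prop := out = normalize_leet_speak_alt text
instance (text : String) (out : String) : Decidable (Spec_normalize_leet_speak text out) := by unfold Spec_normalize_leet_speak; infer_instance

-- ===== CLAIM (what is proved, stated in full; the proofs are below) =====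
def Claim_equal_normalize_leet_speak : Prop := ∀ (text : String), Dom_normalize_leet_speak text → Spec_normalize_leet_speak text (normalize_leet_speak text)

-- ===== LEMMAS AND PROOFS =====

-- single-character substitution, as a named function so terms stay linear in size
def subChar (k v : Char) : Char → Char := fun c => if k = c then v else c

-- replacing a single character by a single character is a per-character map
theorem replace_go_single (a b : Char) :
    ∀ (fuel : Nat) (l acc : List Char), l.length ≤ fuel →
      PySem.Chars.replace.go [a] [b] fuel l acc = acc.reverse ++ l.map (subChar a b) := by
  intro fuel
  induction fuel with
  | zero => intro l acc h; cases l with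
    | nil => simp [PySem.Chars.replace.go]
    | cons c t => simp at h
  | succ n ih =>
    intro l acc h
    cases l with
    | nil => simp [PySem.Chars.replace.go]
    | cons c t =>
      have hlen : t.length ≤ n := by simpa using h
      simp only [PySem.Chars.replace.go]
      by_cases hac : a = c
      · subst hac
        simp [ih t _ hlen, subChar]
      · simp [hac, ih t _ hlen, Ne.symm, subChar]

theorem replace_single (a b : Char) (l : List Char) :
    PySem.Chars.replace l [a] [b] = l.map (subChar a b) := by
  rw [PySem.Chars.replace]
  simp only [List.isEmpty_cons, Bool.false_eq_true, if_false]
  exact (replace_go_single a b l.length l [] le_rfl).trans (by simp)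

-- A's ten substitutions, applied in dict order, agree with B's single lookup on every character
theorem chain_pointwise (c : Char) :
    subChar '+' 't' (subChar '$' 's' (subChar '@' 'a' (subChar '8' 'b' (subChar '7' 't'
      (subChar '5' 's' (subChar '4' 'a' (subChar '3' 'e' (subChar '1' 'i' (subChar '0' 'o' c)))))))))
      = leetDictB.getD c c := by
  by_cases h0 : '0' = c
  · subst h0; decide
  rw [show subChar '0' 'o' c = c from if_neg h0]
  by_cases h1 : '1' = c
  · subst h1; decide
  rw [show subChar '1' 'i' c = c from if_neg h1]
  by_cases h3 : '3' = c
  · subst h3; decide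
  rw [show subChar '3' 'e' c = c from if_neg h3]
  by_cases h4 : '4' = c
  · subst h4; decide
  rw [show subChar '4' 'a' c = c from if_neg h4]
  by_cases h5 : '5' = c
  · subst h5; decide
  rw [show subChar '5' 's' c = c from if_neg h5]
  by_cases h7 : '7' = c
  · subst h7; decide
  rw [show subChar '7' 't' c = c from if_neg h7]
  by_cases h8 : '8' = c
  · subst h8; decide
  rw [show subChar '8' 'b' c = c from if_neg h8]
  by_cases hA : '@' = c
  · subst hA; decide
  rw [show subChar '@' 'a' c = c from if_neg hA]
  by_cases hS : '$' = c
  · subst hS; decide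
  rw [show subChar '$' 's' c = c from if_neg hS]
  by_cases hP : '+' = c
  · subst hP; decide
  rw [show subChar '+' 't' c = c from if_neg hP]
  have hnil : (PySem.Dict.mk ([] : List (Char × Char))).get? c = none := by
    simp [PySem.Dict.get?]
  have hB : leetDictB = PySem.Dict.mk [('0','o'),('1','i'),('3','e'),('4','a'),('5','s'),('7','t'),('8','b'),('@','a'),('$','s'),('+','t')] := by decide
  rw [hB]
  simp only [PySem.Dict.getD, PySem.Dict.get?_mk_cons, beq_iff_eq, hnil,
    if_neg h0, if_neg h1, if_neg h3, if_neg h4, if_neg h5, if_neg h7, if_neg h8,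
    if_neg hA, if_neg hS, if_neg hP, Option.getD]

-- ===== VERDICT (by name: the statement is the Claim_ definition above) =====
theorem normalize_leet_speak_spec : Claim_equal_normalize_leet_speak := by
  intro text _
  unfold Spec_normalize_leet_speak normalize_leet_speak normalize_leet_speak_alt
  have hitems : leetDictA.items =
      [("0","o"),("1","i"),("3","e"),("4","a"),("5","s"),("7","t"),("8","b"),("@","a"),("$","s"),("+","t")] := by
    decide
  rw [hitems]
  simp only [List.foldl_cons, List.foldl_nil, PySem.Str.replace, String.toList_ofList]
  rw [show ("0" : String).toList = ['0'] from rfl, show ("o" : String).toList = ['o'] from rfl,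
      show ("1" : String).toList = ['1'] from rfl, show ("i" : String).toList = ['i'] from rfl,
      show ("3" : String).toList = ['3'] from rfl, show ("e" : String).toList = ['e'] from rfl,
      show ("4" : String).toList = ['4'] from rfl, show ("a" : String).toList = ['a'] from rfl,
      show ("5" : String).toList = ['5'] from rfl, show ("s" : String).toList = ['s'] from rfl,
      show ("7" : String).toList = ['7'] from rfl, show ("t" : String).toList = ['t'] from rfl,
      show ("8" : String).toList = ['8'] from rfl, show ("b" : String).toList = ['b'] from rfl,
      show ("@" : String).toList = ['@'] from rfl,
      show ("$" : String).toList = ['$'] from rfl,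
      show ("+" : String).toList = ['+'] from rfl]
  simp only [replace_single, List.map_map]
  refine congrArg String.ofList ?_
  apply List.map_congr_left
  intro c _
  simp only [Function.comp_apply]
  exact chain_pointwise c
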